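-- pv_equiv track=rewrite | github.com/arulkumara1010/ML | q13.py | dfs
-- ===== SOURCE A (Python) =====
-- def get_neighbors(pos, grid_size, obstacles):
--     directions = [(0, 1), (1, 0), (0, -1), (-1, 0)]  # Right, Down, Left, Up
--     neighbors = []
--     for dx, dy in directions:
--         new_pos = (pos[0] + dx, pos[1] + dy)
--         if 1 <= new_pos[0] <= grid_size[0] and 1 <= new_pos[1] <= grid_size[1] and new_pos not in obstacles:
--             neighbors.append(new_pos)
--     return neighbors
--
-- def dfs(grid_size, start, goal, obstacles):
--     stack = [start]
--     visited = set()
--     path = []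
--     cost = 0
--
--     while stack:
--         current = stack.pop()
--         if current in visited:
--             continue
--         path.append(current)
--         visited.add(current)
--         cost += 1
--         if current == goal:
--             break
--         neighbors = get_neighbors(current, grid_size, obstacles)
--         stack.extend(neighbors[::-1])  # Add neighbors in reverse for DFS
--     return path, cost
-- ===== SOURCE B (Python) =====
-- def get_neighbors(pos, grid_size, obstacles):
--     x, y = pos
--     return [p for p in [(x, y + 1), (x + 1, y), (x, y - 1), (x - 1, y)]
--             if 1 <= p[0] <= grid_size[0] and 1 <= p[1] <= grid_size[1]
--             and p not in obstacles]
--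
-- def dfs(grid_size, start, goal, obstacles):
--     # Iterator-frame DFS: a stack of pending neighbor iterators consumed in
--     # forward order; the cost is recovered as len(path) at the end.
--     path = []
--     seen = set()
--     frames = [iter([start])]
--     while frames:
--         try:
--             cur = next(frames[-1])
--         except StopIteration:
--             frames.pop()
--             continue
--         if cur not in seen:
--             seen.add(cur)
--             path.append(cur)
--             if cur == goal:
--                 break
--             frames.append(iter(get_neighbors(cur, grid_size, obstacles)))
--     return path, len(path)
-- ===== Notes on version B (the rewrite author's own statement) =====
-- stated objective: alternative
-- what changed: A pushes each reversed neighbor list onto one flat position stack and counts cost with a separate counter; B is the iterator-frame DFS (a stack of pending neighbor iterators consumed in forward order) that keeps no cost counter and returns len(path) at the end.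
import Mathlib
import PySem

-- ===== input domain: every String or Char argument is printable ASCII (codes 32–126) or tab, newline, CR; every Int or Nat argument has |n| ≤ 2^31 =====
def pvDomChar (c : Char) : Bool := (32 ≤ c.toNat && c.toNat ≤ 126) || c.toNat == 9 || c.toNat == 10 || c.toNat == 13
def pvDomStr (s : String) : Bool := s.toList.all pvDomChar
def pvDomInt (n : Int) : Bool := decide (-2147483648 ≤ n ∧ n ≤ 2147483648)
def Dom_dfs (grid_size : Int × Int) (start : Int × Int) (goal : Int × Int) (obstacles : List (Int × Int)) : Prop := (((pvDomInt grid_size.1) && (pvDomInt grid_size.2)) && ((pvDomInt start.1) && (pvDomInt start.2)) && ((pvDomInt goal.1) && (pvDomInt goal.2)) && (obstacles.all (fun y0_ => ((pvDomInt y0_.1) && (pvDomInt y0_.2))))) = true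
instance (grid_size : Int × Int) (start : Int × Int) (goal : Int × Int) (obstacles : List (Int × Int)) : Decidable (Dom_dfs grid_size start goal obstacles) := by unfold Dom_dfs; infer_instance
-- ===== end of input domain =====

-- B replaces A's flat position stack (reversed neighbor pushes + a separate cost counter) by the
-- iterator-frame DFS: a stack of pending neighbor iterators consumed in forward order, cost = len(path).
-- Neither Python mutates its arguments.

-- ===== PORT A =====
-- literal port of A's get_neighbors (a loop over the four directions with appends)
def getNeighbors (pos : Int × Int) (grid_size : Int × Int) (obstacles : List (Int × Int)) : List (Int × Int) :=
  [((0:Int), (1:Int)), (1, 0), (0, -1), (-1, 0)].foldl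
    (fun neighbors d =>
      let new_pos := (pos.1 + d.1, pos.2 + d.2)
      if 1 ≤ new_pos.1 ∧ new_pos.1 ≤ grid_size.1 ∧ 1 ≤ new_pos.2 ∧ new_pos.2 ≤ grid_size.2 ∧ new_pos ∉ obstacles
      then neighbors ++ [new_pos] else neighbors) []

-- totality fuel (a guard only): more iterations than either loop can ever make
-- (each visit is a fresh cell of the grid or the start, each visit pushes ≤ 4 stack entries)
def pvFuel (grid_size : Int × Int) : Nat := 4 * (grid_size.1.toNat * grid_size.2.toNat + 2) + 2

-- A's while loop; the Lean list head is the TOP of the Python stack, so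
-- 'stack.extend(neighbors[::-1])' followed by 'stack.pop()' is prepending 'neighbors' in order.
def dfsLoop (grid_size : Int × Int) (goal : Int × Int) (obstacles : List (Int × Int)) :
    Nat → List (Int × Int) → PySem.Set (Int × Int) → List (Int × Int) → Int → (List (Int × Int)) × Int
  | 0, _, _, path, cost => (path, cost)
  | _ + 1, [], _, path, cost => (path, cost)
  | fuel + 1, current :: rest, visited, path, cost =>
    if PySem.Set.contains visited current then
      dfsLoop grid_size goal obstacles fuel rest visited path cost
    else
      let path' := path ++ [current]
      let visited' := PySem.Set.add visited current
      let cost' := cost + 1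
      if current = goal then (path', cost')
      else dfsLoop grid_size goal obstacles fuel (getNeighbors current grid_size obstacles ++ rest) visited' path' cost'

def dfs (grid_size : Int × Int) (start : Int × Int) (goal : Int × Int) (obstacles : List (Int × Int)) : (List (Int × Int)) × Int :=
  dfsLoop grid_size goal obstacles (pvFuel grid_size) [start] PySem.Set.empty [] 0

-- ===== PORT B =====
-- literal port of B's get_neighbors (a comprehension: filter over the four candidate cells)
def neighborsOf (pos : Int × Int) (grid_size : Int × Int) (obstacles : List (Int × Int)) : List (Int × Int) :=
  let x := pos.1
  let y := pos.2
  [((x, y + 1) : Int × Int), (x + 1, y), (x, y - 1), (x - 1, y)].filter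
    (fun p => decide (1 ≤ p.1 ∧ p.1 ≤ grid_size.1 ∧ 1 ≤ p.2 ∧ p.2 ≤ grid_size.2 ∧ p ∉ obstacles))

-- B's while loop over a stack of neighbor iterators; Lean list head = Python frames[-1] (the top),
-- an iterator = the list of its not-yet-drawn elements. The '[] :: fs' case is the StopIteration
-- branch (pop the exhausted frame and continue); it draws no element, so it keeps the fuel
-- (recursion is on (fuel, frames.length), lexicographic — the guard stays a guard).
def dfsFrames (grid_size : Int × Int) (goal : Int × Int) (obstacles : List (Int × Int)) :
    Nat → List (List (Int × Int)) → PySem.Set (Int × Int) → List (Int × Int) → List (Int × Int)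
  | 0, _, _, path => path
  | _ + 1, [], _, path => path
  | fuel + 1, [] :: fs, seen, path => dfsFrames grid_size goal obstacles (fuel + 1) fs seen path
  | fuel + 1, (cur :: it) :: fs, seen, path =>
    if PySem.Set.contains seen cur then
      dfsFrames grid_size goal obstacles fuel (it :: fs) seen path
    else
      let seen' := PySem.Set.add seen cur
      let path' := path ++ [cur]
      if cur = goal then path'
      else dfsFrames grid_size goal obstacles fuel (neighborsOf cur grid_size obstacles :: it :: fs) seen' path'
  termination_by fuel frames => (fuel, frames.length)

def dfs_alt (grid_size : Int × Int) (start : Int × Int) (goal : Int × Int) (obstacles : List (Int × Int)) : (List (Int × Int)) × Int :=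
  let path := dfsFrames grid_size goal obstacles (pvFuel grid_size) [[start]] PySem.Set.empty []
  (path, (path.length : Int))

-- ===== PRECONDITION & SPEC =====
def Spec_dfs (grid_size : Int × Int) (start : Int × Int) (goal : Int × Int) (obstacles : List (Int × Int)) (out : (List (Int × Int)) × Int) : Prop := out = dfs_alt grid_size start goal obstacles
instance (grid_size : Int × Int) (start : Int × Int) (goal : Int × Int) (obstacles : List (Int × Int)) (out : (List (Int × Int)) × Int) : Decidable (Spec_dfs grid_size start goal obstacles out) := by unfold Spec_dfs; infer_instance

-- ===== CLAIM (what is proved, stated in full; the proofs are below) =====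
def Claim_equal_dfs : Prop := ∀ (grid_size : Int × Int) (start : Int × Int) (goal : Int × Int) (obstacles : List (Int × Int)), Dom_dfs grid_size start goal obstacles → Spec_dfs grid_size start goal obstacles (dfs grid_size start goal obstacles)

-- ===== LEMMAS AND PROOFS =====

-- the two neighbor helpers compute the same list
theorem neighborsOf_eq (pos grid_size : Int × Int) (obstacles : List (Int × Int)) :
    neighborsOf pos grid_size obstacles = getNeighbors pos grid_size obstacles := by
  obtain ⟨x, y⟩ := pos
  simp only [neighborsOf, getNeighbors, List.foldl_cons, List.foldl_nil, List.filter_cons,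
    List.filter_nil, decide_eq_true_eq, add_zero, ← sub_eq_add_neg]
  split_ifs <;> simp

-- A's flat stack is the flattening of B's frame stack; A pops one element per iteration and B
-- draws one element per fuel unit (StopIteration pops keep the fuel and drop nothing from the
-- flattening), so with the same seen-set and cost = path.length the two runs agree at every fuel.
theorem loop_eq_frames (grid_size goal : Int × Int) (obstacles : List (Int × Int)) :
    ∀ (fuel : Nat) (frames : List (List (Int × Int))) (seen : PySem.Set (Int × Int))
      (path : List (Int × Int)),
      dfsLoop grid_size goal obstacles fuel frames.flatten seen path (path.length : Int)
        = (let p := dfsFrames grid_size goal obstacles fuel frames seen path; (p, (p.length : Int))) := by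
  intro fuel
  induction fuel with
  | zero => intro frames seen path; simp [dfsLoop, dfsFrames]
  | succ fuel ih =>
    intro frames seen path
    induction frames with
    | nil => simp [dfsLoop, dfsFrames]
    | cons f fs ihf =>
      match f with
      | [] =>
        show dfsLoop grid_size goal obstacles (fuel+1) ([] :: fs).flatten seen path _ = _
        simp only [List.flatten_cons, List.nil_append, dfsFrames]
        exact ihf
      | cur :: it =>
        show dfsLoop grid_size goal obstacles (fuel+1) (cur :: (it ++ fs.flatten)) seen path _ = _
        simp only [dfsLoop, dfsFrames]
        by_cases hv : PySem.Set.contains seen cur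
        · simp only [hv, if_true]
          have := ih (it :: fs) seen path
          simpa using this
        · simp only [hv, if_false, Bool.false_eq_true]
          by_cases hg : cur = goal
          · simp [hg]
          · simp only [hg, if_false]
            have := ih (neighborsOf cur grid_size obstacles :: it :: fs) (PySem.Set.add seen cur) (path ++ [cur])
            simpa [neighborsOf_eq, List.length_append] using this

-- ===== VERDICT (by name: the statement is the Claim_ definition above) =====
theorem dfs_spec : Claim_equal_dfs := by
  intro grid_size start goal obstacles _
  show dfs grid_size start goal obstacles = dfs_alt grid_size start goal obstacles
  unfold dfs dfs_alt
  have := loop_eq_frames grid_size goal obstacles (pvFuel grid_size) [[start]] PySem.Set.empty []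
  simpa using this
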